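-- pv_equiv track=rewrite | github.com/XeroxAndarian/RSTRating | TeamCalculatorVerisons/TeamCalculator_v1.9.py | standings
-- ===== SOURCE A (Python) =====
-- def translator(DIC, score):
--     return list(DIC.keys())[list(DIC.values()).index(score)]
--
-- def standings(DIC):
--     S = {}
--     sorted_players = list(DIC.values())
--     sorted_players.sort(reverse=True)
--     i = 1
--     for rating in sorted_players:
--         S[translator(DIC, rating)] = i
--         i = i + 1
--     return S
-- ===== SOURCE B (Python) =====
-- def standings(DIC):
--     # Counting-based ranking: no sort of the full value list, no repeated
--     # .index scans. Each distinct rating's position is the number of ratings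
--     # greater than or equal to it; the player shown for a rating is the first
--     # player holding it.
--     values = list(DIC.values())
--     first_key = {}
--     for player, rating in DIC.items():
--         first_key.setdefault(rating, player)
--     S = {}
--     for rating in sorted(first_key, reverse=True):
--         S[first_key[rating]] = sum(1 for x in values if x >= rating)
--     return S
-- ===== Notes on version B (the rewrite author's own statement) =====
-- stated objective: faster
-- what changed: A sorts the full value list and, for every sorted element, rebuilds the key/value lists and scans them with .index to find the player; B never sorts the value list: it records each rating's first player in one pass and ranks each distinct rating by counting how many ratings are >= it.
import Mathlib
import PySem

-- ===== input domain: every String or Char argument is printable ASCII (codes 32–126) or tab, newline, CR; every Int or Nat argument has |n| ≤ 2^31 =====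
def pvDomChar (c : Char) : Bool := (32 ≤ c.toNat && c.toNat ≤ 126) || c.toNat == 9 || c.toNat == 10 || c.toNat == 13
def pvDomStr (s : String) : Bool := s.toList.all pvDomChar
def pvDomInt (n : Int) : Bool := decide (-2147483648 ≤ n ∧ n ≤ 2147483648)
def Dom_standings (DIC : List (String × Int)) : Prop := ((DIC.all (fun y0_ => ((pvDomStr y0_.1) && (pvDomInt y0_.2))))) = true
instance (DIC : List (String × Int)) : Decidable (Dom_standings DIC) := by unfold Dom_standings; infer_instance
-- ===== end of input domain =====

-- B replaces A's sort-and-.index-scan loop by one-pass first-player recording plus counting-based ranking; proved equal on every input.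

-- ===== PORT A =====
-- list(DIC.keys())[list(DIC.values()).index(score)]; none = the ValueError branch
-- (unreachable from standings, whose scores come from DIC.values()).
def translator (DIC : List (String × Int)) (score : Int) : Option String :=
  (PySem.List.index? (DIC.map Prod.snd) score).bind
    (fun i => PySem.List.pyGet? (DIC.map Prod.fst) (i : Int))

def standings (DIC : List (String × Int)) : List (String × Int) :=
  let sorted_players := PySem.List.sorted (DIC.map Prod.snd) (fun x => x) true
  let acc := sorted_players.foldl
    (fun (acc : PySem.Dict String Int × Int) rating =>
      match translator DIC rating with
      | some k => (acc.1.insert k acc.2, acc.2 + 1)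
      | none => (acc.1, acc.2 + 1))   -- unreachable: rating ∈ DIC.values()
    ((PySem.Dict.empty : PySem.Dict String Int), (1 : Int))
  acc.1.items

-- ===== PORT B =====
def standings_alt (DIC : List (String × Int)) : List (String × Int) :=
  let values := DIC.map Prod.snd
  let first_key := DIC.foldl
    (fun (d : PySem.Dict Int String) p => d.setdefault p.2 p.1)
    (PySem.Dict.empty : PySem.Dict Int String)
  -- sum(1 for x in values if x >= rating) is the count of such x (a 0/1-sum IS List.countP);
  -- first_key[rating]'s KeyError branch is unreachable (rating ∈ first_key's keys), getD "" stands in.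
  let S := (PySem.List.sorted first_key.keys (fun x => x) true).foldl
    (fun (s : PySem.Dict String Int) rating =>
      s.insert (first_key.getD rating "")
        ((values.countP (fun x => decide (rating ≤ x)) : Int)))
    (PySem.Dict.empty : PySem.Dict String Int)
  S.items

-- ===== PRECONDITION & SPEC =====
def Spec_standings (DIC : List (String × Int)) (out : List (String × Int)) : Prop := out = standings_alt DIC
instance (DIC : List (String × Int)) (out : List (String × Int)) : Decidable (Spec_standings DIC out) := by unfold Spec_standings; infer_instance

-- ===== CLAIM (what is proved, stated in full; the proofs are below) =====
def Claim_equal_standings : Prop := ∀ (DIC : List (String × Int)), Dom_standings DIC → Spec_standings DIC (standings DIC)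

-- ===== LEMMAS AND PROOFS =====

-- bridge: Dict.getD through get?
lemma dict_getD_eq {κ ν : Type} [BEq κ] (d : PySem.Dict κ ν) (k : κ) (df : ν) :
    d.getD k df = (d.get? k).getD df := by
  simp [PySem.Dict.getD, PySem.Dict.get?]

-- first_key's lookup is "first pair whose value is r"
lemma fk_get? (DIC : List (String × Int)) (d : PySem.Dict Int String) (r : Int) :
    (DIC.foldl (fun d p => d.setdefault p.2 p.1) d).get? r
      = ((d.get? r).or ((DIC.find? (fun p => p.2 == r)).map Prod.fst)) := by
  induction DIC generalizing d with
  | nil => simp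
  | cons p t ih =>
    simp only [List.foldl_cons, List.find?_cons]
    by_cases hp : p.2 = r
    · subst hp
      simp only [BEq.rfl]
      rw [ih]
      rw [PySem.Dict.get?_setdefault_self]
      cases h : d.get? p.2 <;> simp [Option.or]
    · have hne : (p.2 == r) = false := by simp [hp]
      simp only [hne]
      rw [ih, PySem.Dict.get?_setdefault_of_ne _ _ (fun h => hp h.symm)]

-- translator r, for r a value of DIC, is the key of the first pair with value r
lemma translator_eq (DIC : List (String × Int)) (r : Int) (hr : r ∈ DIC.map Prod.snd) :
    translator DIC r = (DIC.find? (fun p => p.2 == r)).map Prod.fst := by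
  induction DIC with
  | nil => simp at hr
  | cons p t ih =>
    simp only [List.map_cons] at hr
    by_cases hp : p.2 = r
    · subst hp
      simp only [translator, List.map_cons]
      rw [PySem.List.index?_cons_self]
      simp
    · have hrt : r ∈ t.map Prod.snd := by
        rcases List.mem_cons.mp hr with h | h
        · exact absurd h.symm hp
        · exact h
      have hne : (p.2 == r) = false := by simp [hp]
      simp only [translator, List.map_cons]
      rw [PySem.List.index?_cons_of_ne _ hp]
      obtain ⟨i, hi⟩ : ∃ i, PySem.List.index? (t.map Prod.snd) r = some i :=
        Option.isSome_iff_exists.mp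
          ((PySem.List.index?_isSome_iff (t.map Prod.snd) r).mpr hrt)
      rw [hi]
      simp only [Option.map_some, Option.bind_some]
      have hcast : ((i + 1 : Nat) : Int) = (i : Int) + 1 := by push_cast; ring
      rw [hcast, PySem.List.pyGet?_cons_succ]
      have hih := ih hrt
      simp only [translator, hi, Option.bind_some] at hih
      rw [hih, List.find?_cons, hne]

-- keys of the first_key dict = set(values) in first-occurrence order
lemma fk_keys (DIC : List (String × Int)) (d : PySem.Dict Int String) :
    (DIC.foldl (fun d p => d.setdefault p.2 p.1) d).keys
      = (DIC.map Prod.snd).foldl PySem.Set.add d.keys := by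
  induction DIC generalizing d with
  | nil => simp
  | cons p t ih =>
    simp only [List.foldl_cons, List.map_cons]
    rw [ih]
    congr 1
    rw [PySem.Dict.keys_setdefault]
    by_cases h : d.contains p.2 = true
    · have hm : p.2 ∈ d.keys := (PySem.Dict.contains_iff_mem_keys d p.2).mp h
      simp [PySem.Set.add, PySem.Set.contains_eq_listContains, hm, h]
    · have h' : p.2 ∉ d.keys := fun hm =>
        h ((PySem.Dict.contains_iff_mem_keys d p.2).mpr hm)
      simp only [Bool.not_eq_true] at h
      simp [h, PySem.Set.add, PySem.Set.contains_eq_listContains, h']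

-- the central loop equivalence: A's enumerate-over-sorted-duplicates fold equals
-- B's count-based fold over the strictly descending distinct ratings
lemma main_fold (vs : List Int) (fk : Int → String) :
    ∀ (s e : List Int) (d : PySem.Dict String Int) (i : Int),
      s.Pairwise (fun a b => b ≤ a) →
      e.Pairwise (fun a b => b < a) →
      (∀ x, x ∈ e ↔ x ∈ s) →
      (∀ r ∈ s, ((vs.countP (fun x => decide (r ≤ x)) : Int)
          = (i - 1) + (s.countP (fun x => decide (r ≤ x)) : Int))) →
      (s.foldl (fun acc r => (acc.1.insert (fk r) acc.2, acc.2 + 1)) (d, i)).1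
        = e.foldl (fun t r => t.insert (fk r)
            ((vs.countP (fun x => decide (r ≤ x)) : Int))) d := by
  intro s
  induction s with
  | nil =>
    intro e d i _ _ hmem _
    have he : e = [] := List.eq_nil_iff_forall_not_mem.mpr
      (fun x hx => by simpa using (hmem x).mp hx)
    subst he; rfl
  | cons r0 t ih =>
    intro e d i hs he hmem hi
    obtain ⟨hle, hst⟩ := List.pairwise_cons.mp hs
    have hr0e : r0 ∈ e := (hmem r0).mpr List.mem_cons_self
    obtain ⟨h, e2, rfl⟩ : ∃ h e2, e = h :: e2 := by
      cases e with
      | nil => simp at hr0e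
      | cons a b => exact ⟨a, b, rfl⟩
    obtain ⟨hgt, het⟩ := List.pairwise_cons.mp he
    have hh : h = r0 := by
      have h1 : h ≤ r0 := by
        rcases List.mem_cons.mp ((hmem h).mp List.mem_cons_self) with h' | h'
        · exact le_of_eq h'
        · exact hle h h'
      rcases List.mem_cons.mp hr0e with h' | h'
      · exact h'.symm
      · exact absurd (hgt r0 h') (not_lt.mpr h1)
    subst h
    -- the invariant passes to the tail
    have hi' : ∀ r ∈ t, ((vs.countP (fun x => decide (r ≤ x)) : Int)
        = ((i + 1) - 1) + (t.countP (fun x => decide (r ≤ x)) : Int)) := by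
      intro r hr
      have hmain := hi r (List.mem_cons_of_mem _ hr)
      rw [List.countP_cons,
        if_pos (show (decide (r ≤ r0)) = true by simp [hle r hr])] at hmain
      push_cast at hmain ⊢
      omega
    simp only [List.foldl_cons]
    by_cases hr0t : r0 ∈ t
    · -- duplicated rating: A overwrites later; B's single entry absorbs the overwrite
      have hmem' : ∀ x, x ∈ r0 :: e2 ↔ x ∈ t := by
        intro x
        constructor
        · intro hx
          rcases List.mem_cons.mp ((hmem x).mp hx) with h' | h'
          · exact h' ▸ hr0t
          · exact h'
        · intro hx
          exact (hmem x).mpr (List.mem_cons_of_mem _ hx)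
      rw [ih (r0 :: e2) (PySem.Dict.insert d (fk r0) i) (i + 1) hst he hmem' hi']
      simp only [List.foldl_cons, PySem.Dict.insert_insert_self]
    · -- last copy of r0: A's final index i equals B's count of ratings ≥ r0
      have hval : ((vs.countP (fun x => decide (r0 ≤ x)) : Int)) = i := by
        have hmain := hi r0 List.mem_cons_self
        rw [List.countP_cons, if_pos (show (decide (r0 ≤ r0)) = true by simp)] at hmain
        have hzero : t.countP (fun x => decide (r0 ≤ x)) = 0 := by
          rw [List.countP_eq_zero]
          intro x hx
          have h1 : x ≤ r0 := hle x hx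
          have h2 : x ≠ r0 := fun h => hr0t (h ▸ hx)
          simp [not_le.mpr (lt_of_le_of_ne h1 h2)]
        rw [hzero] at hmain
        push_cast at hmain
        omega
      have hmem' : ∀ x, x ∈ e2 ↔ x ∈ t := by
        intro x
        constructor
        · intro hx
          have hxr : x ≠ r0 := ne_of_lt (hgt x hx)
          rcases List.mem_cons.mp ((hmem x).mp (List.mem_cons_of_mem _ hx)) with h' | h'
          · exact absurd h' hxr
          · exact h'
        · intro hx
          have hxr : x ≠ r0 := fun h => hr0t (h ▸ hx)
          rcases List.mem_cons.mp ((hmem x).mpr (List.mem_cons_of_mem _ hx)) with h' | h'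
          · exact absurd h' hxr
          · exact h'
      rw [ih e2 (PySem.Dict.insert d (fk r0) i) (i + 1) hst het hmem' hi']
      rw [hval]

theorem standings_eq (DIC : List (String × Int)) : standings DIC = standings_alt DIC := by
  have hK : ∀ r ∈ DIC.map Prod.snd,
      translator DIC r
        = some ((DIC.foldl (fun d p => d.setdefault p.2 p.1)
            (PySem.Dict.empty : PySem.Dict Int String)).getD r "") := by
    intro r hr
    obtain ⟨q, hq⟩ : ∃ q, DIC.find? (fun p => p.2 == r) = some q := by
      apply Option.isSome_iff_exists.mp
      apply List.find?_isSome.mpr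
      obtain ⟨p, hp, hp2⟩ := List.mem_map.mp hr
      exact ⟨p, hp, by simp [hp2]⟩
    rw [translator_eq DIC r hr, hq, dict_getD_eq, fk_get?, hq]
    simp
  have hkeys : (DIC.foldl (fun d p => d.setdefault p.2 p.1)
      (PySem.Dict.empty : PySem.Dict Int String)).keys
        = PySem.Set.ofList (DIC.map Prod.snd) := by
    rw [fk_keys, PySem.Dict.keys_empty, PySem.Set.ofList_eq_foldl]
  have hcong := PySem.List.foldl_congr_mem
    (PySem.List.sorted (DIC.map Prod.snd) (fun x => x) true)
    (fun (acc : PySem.Dict String Int × Int) rating =>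
      match translator DIC rating with
      | some k => (acc.1.insert k acc.2, acc.2 + 1)
      | none => (acc.1, acc.2 + 1))
    (fun (acc : PySem.Dict String Int × Int) rating =>
      (acc.1.insert ((DIC.foldl (fun d p => d.setdefault p.2 p.1)
          (PySem.Dict.empty : PySem.Dict Int String)).getD rating "") acc.2, acc.2 + 1))
    ((PySem.Dict.empty : PySem.Dict String Int), (1 : Int))
    (by
      intro acc r hr
      dsimp only
      rw [hK r ((PySem.List.mem_sorted _ _ _ r).mp hr)])
  have hss := PySem.List.sorted_pairwise_rev (DIC.map Prod.snd) (fun x => x)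
  have hnd : (PySem.List.sorted (DIC.foldl (fun d p => d.setdefault p.2 p.1)
      (PySem.Dict.empty : PySem.Dict Int String)).keys (fun x => x) true).Nodup := by
    refine (PySem.List.sorted_perm ((DIC.foldl
        (fun (d : PySem.Dict Int String) (p : String × Int) => d.setdefault p.2 p.1)
        (PySem.Dict.empty : PySem.Dict Int String)).keys)
      (fun x : Int => x) true).nodup_iff.mpr ?_
    rw [hkeys]
    exact PySem.Set.nodup_ofList _
  have hnd' : List.Pairwise (fun (a b : Int) => a ≠ b)
      (PySem.List.sorted (DIC.foldl (fun d p => d.setdefault p.2 p.1)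
        (PySem.Dict.empty : PySem.Dict Int String)).keys (fun x => x) true) := hnd
  have he := (List.Pairwise.and
      (PySem.List.sorted_pairwise_rev (DIC.foldl
        (fun (d : PySem.Dict Int String) (p : String × Int) => d.setdefault p.2 p.1)
        (PySem.Dict.empty : PySem.Dict Int String)).keys (fun x => x)) hnd').imp
    (fun hab => lt_of_le_of_ne hab.1 (Ne.symm hab.2))
  have hmem : ∀ x, x ∈ PySem.List.sorted (DIC.foldl (fun d p => d.setdefault p.2 p.1)
      (PySem.Dict.empty : PySem.Dict Int String)).keys (fun x => x) true
        ↔ x ∈ PySem.List.sorted (DIC.map Prod.snd) (fun x => x) true := by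
    intro x
    rw [PySem.List.mem_sorted, PySem.List.mem_sorted, hkeys, PySem.Set.mem_ofList]
  have hi : ∀ r ∈ PySem.List.sorted (DIC.map Prod.snd) (fun x => x) true,
      (((DIC.map Prod.snd).countP (fun x => decide (r ≤ x)) : Int)
        = ((1 : Int) - 1) + ((PySem.List.sorted (DIC.map Prod.snd) (fun x => x) true).countP
            (fun x => decide (r ≤ x)) : Int)) := by
    intro r _
    rw [(PySem.List.sorted_perm (DIC.map Prod.snd) (fun x => x) true).countP_eq]
    omega
  have hmain := main_fold (DIC.map Prod.snd)
    (fun r => (DIC.foldl (fun d p => d.setdefault p.2 p.1)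
      (PySem.Dict.empty : PySem.Dict Int String)).getD r "")
    (PySem.List.sorted (DIC.map Prod.snd) (fun x => x) true)
    (PySem.List.sorted (DIC.foldl (fun d p => d.setdefault p.2 p.1)
      (PySem.Dict.empty : PySem.Dict Int String)).keys (fun x => x) true)
    (PySem.Dict.empty : PySem.Dict String Int) 1 hss he hmem hi
  simp only [standings, standings_alt]
  rw [hcong]
  exact congrArg PySem.Dict.items hmain

-- ===== VERDICT (by name: the statement is the Claim_ definition above) =====
theorem standings_spec : Claim_equal_standings := by
  intro DIC _
  unfold Spec_standings
  exact standings_eq DIC
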